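-- pv_equiv track=rewrite | github.com/maronsson89/DiscordOrcle | main.py | main_desc
-- ===== SOURCE A (Python) =====
-- def main_desc(text: str) -> str:
--     sents = [s.strip() for s in text.split(".") if len(s.strip()) > 15]
--     bad_keywords = (
--         "source", "favored weapon", "specific magic", "price", "bulk", "hands",
--         "damage", "category", "group", "type", "level"
--     )
--     keep = [s for s in sents if not any(k in s.lower() for k in bad_keywords)]
--     desc = (". ".join(keep[:2]) + ".") if keep else "No description available."
--     return (desc[:4093] + '...') if len(desc) > 4096 else desc
-- ===== SOURCE B (Python) =====
-- def main_desc(text: str) -> str: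
--     bad_keywords = (
--         "source", "favored weapon", "specific magic", "price", "bulk", "hands",
--         "damage", "category", "group", "type", "level"
--     )
--
--     def wanted(s):
--         return len(s) > 15 and not any(k in s.lower() for k in bad_keywords)
--
--     # single character-level scan: no split(), sentences are assembled in a buffer
--     # and judged as soon as their terminating '.' is seen; stops collecting at two
--     kept = []
--     buf = []
--     for ch in text:
--         if ch == ".":
--             if len(kept) < 2:
--                 s = "".join(buf).strip()
--                 if wanted(s):
--                     kept.append(s)
--             buf = []
--         else:
--             buf.append(ch)
--     if len(kept) < 2:
--         s = "".join(buf).strip()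
--         if wanted(s):
--             kept.append(s)
--     desc = ". ".join(kept) + "." if kept else "No description available."
--     return desc[:4093] + '...' if len(desc) > 4096 else desc
-- ===== Notes on version B (the rewrite author's own statement) =====
-- stated objective: alternative
-- what changed: Replaces A's split-then-two-filter-comprehensions pipeline by a single character-level streaming scan that builds each sentence in a buffer, judges it (length and keyword test) the moment its terminating period is seen, and stops collecting once two sentences are kept.
import Mathlib
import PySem

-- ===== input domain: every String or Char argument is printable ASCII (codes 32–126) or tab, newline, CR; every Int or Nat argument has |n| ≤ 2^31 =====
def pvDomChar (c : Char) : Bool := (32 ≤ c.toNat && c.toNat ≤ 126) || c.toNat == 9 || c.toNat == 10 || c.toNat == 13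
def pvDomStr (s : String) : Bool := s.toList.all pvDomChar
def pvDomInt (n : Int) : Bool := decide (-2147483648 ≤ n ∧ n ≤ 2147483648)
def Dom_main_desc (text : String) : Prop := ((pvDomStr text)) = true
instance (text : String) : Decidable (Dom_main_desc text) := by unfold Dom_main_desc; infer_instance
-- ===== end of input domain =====

-- B replaces A's split-then-filter list comprehensions by a single character-level scan that assembles each sentence in a buffer, judges it at its terminating period, and stops collecting after two; same return value, stated for printable-ASCII input.


-- ===== PORT A =====
-- the tuple of bad keywords (shared data of both Pythons)
def pvBad : List (List Char) :=
  ["source".toList, "favored weapon".toList, "specific magic".toList, "price".toList,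
   "bulk".toList, "hands".toList, "damage".toList, "category".toList, "group".toList,
   "type".toList, "level".toList]

-- any(k in s.lower() for k in bad_keywords) — the same expression in both Pythons
def pvIsBad (s : List Char) : Bool :=
  pvBad.any (fun k => PySem.Chars.isIn k (PySem.Chars.lower s))

def main_desc (text : String) : String :=
  let sents := ((PySem.Chars.splitOn text.toList ['.']).map PySem.Chars.strip).filter
    (fun t => decide (15 < PySem.Chars.len t))
  let keep := sents.filter (fun s => ! pvIsBad s)
  let desc := if keep = [] then "No description available.".toList
    else PySem.Chars.join ['.', ' '] (PySem.List.slice keep none (some 2)) ++ ['.']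
  String.mk (if 4096 < PySem.Chars.len desc
    then PySem.Chars.slice desc none (some 4093) ++ "...".toList else desc)

-- ===== PORT B =====
-- Source B's `wanted(s)`: long enough and free of bad keywords
def pvWanted (s : List Char) : Bool :=
  decide (15 < PySem.Chars.len s) && ! pvIsBad s

-- Source B's character loop: `buf` is the current unfinished sentence, `kept` the sentences collected so far
def altScan (chars : List Char) (buf : List Char) (kept : List (List Char)) : List (List Char) :=
  match chars with
  | [] =>
    if kept.length < 2 then
      let s := PySem.Chars.strip buf
      if pvWanted s then kept ++ [s] else kept
    else kept
  | c :: rest =>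
    if c = '.' then
      altScan rest []
        (if kept.length < 2 then
          let s := PySem.Chars.strip buf
          if pvWanted s then kept ++ [s] else kept
        else kept)
    else altScan rest (buf ++ [c]) kept

def main_desc_alt (text : String) : String :=
  let kept := altScan text.toList [] []
  let desc := if kept = [] then "No description available.".toList
    else PySem.Chars.join ['.', ' '] kept ++ ['.']
  String.mk (if 4096 < PySem.Chars.len desc
    then PySem.Chars.slice desc none (some 4093) ++ "...".toList else desc)

-- ===== PRECONDITION & SPEC =====
def Spec_main_desc (text : String) (out : String) : Prop := out = main_desc_alt text
instance (text : String) (out : String) : Decidable (Spec_main_desc text out) := by unfold Spec_main_desc; infer_instance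

-- ===== CLAIM (what is proved, stated in full; the proofs are below) =====
def Claim_equal_main_desc : Prop := ∀ (text : String), Dom_main_desc text → Spec_main_desc text (main_desc text)

-- ===== LEMMAS AND PROOFS =====
-- a direct structural recursion computing text.split(".")
def simpleSplit : List Char → List (List Char)
  | [] => [[]]
  | c :: rest =>
    if c = '.' then [] :: simpleSplit rest
    else
      match simpleSplit rest with
      | [] => [[c]]
      | h :: t => (c :: h) :: t

-- prepend a prefix onto the first piece
def consHead (p : List Char) : List (List Char) → List (List Char)
  | [] => [p]
  | h :: t => (p ++ h) :: t

theorem simpleSplit_ne_nil (l : List Char) : simpleSplit l ≠ [] := by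
  cases l with
  | nil => simp [simpleSplit]
  | cons c rest =>
    simp only [simpleSplit]
    split
    · simp
    · split <;> simp_all

theorem go_eq_simpleSplit (fuel : Nat) (l cur : List Char) (acc : List (List Char))
    (h : l.length < fuel) :
    PySem.Chars.splitOn.go ['.'] fuel l cur acc =
      acc.reverse ++ consHead cur.reverse (simpleSplit l) := by
  induction fuel generalizing l cur acc with
  | zero => omega
  | succ m ih =>
    cases l with
    | nil =>
      simp [PySem.Chars.splitOn.go, simpleSplit, consHead]
    | cons c rest =>
      by_cases hc : c = '.'
      · subst hc
        have hpre : List.isPrefixOf ['.'] ('.' :: rest) = true := by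
          simp [List.isPrefixOf]
        rw [PySem.Chars.splitOn.go]
        simp only [hpre, if_pos, List.length_cons, List.length_nil, List.drop_succ_cons,
          List.drop_zero]
        rw [ih rest [] (cur.reverse :: acc) (by simpa using Nat.lt_of_succ_lt_succ (by simpa using h))]
        simp [simpleSplit]
        cases hs : simpleSplit rest with
        | nil => exact absurd hs (simpleSplit_ne_nil rest)
        | cons a b => simp [consHead]
      · have hpre : List.isPrefixOf ['.'] (c :: rest) = false := by
          simp [List.isPrefixOf]
          exact fun hh => absurd hh.symm hc
        rw [PySem.Chars.splitOn.go]
        simp only [hpre, Bool.false_eq_true, if_neg, not_false_iff]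
        rw [ih rest (c :: cur) acc (by simpa using Nat.lt_of_succ_lt_succ (by simpa using h))]
        cases hs : simpleSplit rest with
        | nil => exact absurd hs (simpleSplit_ne_nil rest)
        | cons a b => simp [simpleSplit, hc, hs, consHead]

theorem splitOn_eq_simpleSplit (l : List Char) :
    PySem.Chars.splitOn l ['.'] = simpleSplit l := by
  have := go_eq_simpleSplit (l.length + 1) l [] [] (by omega)
  rw [PySem.Chars.splitOn, this]
  cases hs : simpleSplit l with
  | nil => exact absurd hs (simpleSplit_ne_nil l)
  | cons a b => simp [consHead]

-- filtered sentence list of a piece list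
def goodOf (xs : List (List Char)) : List (List Char) :=
  (xs.map PySem.Chars.strip).filter pvWanted

-- the scanner's invariant: it returns `kept` plus the next wanted sentences, up to two in total
theorem altScan_eq (chars : List Char) : ∀ (buf : List Char) (kept : List (List Char)),
    kept.length ≤ 2 →
    altScan chars buf kept = kept ++ (goodOf (consHead buf (simpleSplit chars))).take (2 - kept.length) := by
  induction chars with
  | nil =>
    intro buf kept hk
    simp only [altScan, simpleSplit, consHead, goodOf, List.map_cons, List.map_nil,
      List.append_nil]
    by_cases h2 : kept.length < 2
    · have h1 : 1 ≤ 2 - kept.length := by omega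
      by_cases hw : pvWanted (PySem.Chars.strip buf)
      · simp only [h2, if_pos, hw, List.filter_cons, List.filter_nil]
        rw [List.take_of_length_le (by simpa using h1)]
      · simp [h2, hw]
    · have hlen : kept.length = 2 := by omega
      simp [hlen]
  | cons c rest ih =>
    intro buf kept hk
    by_cases hc : c = '.'
    · subst hc
      simp only [altScan, if_pos]
      have hsplit : consHead buf (simpleSplit ('.' :: rest)) = buf :: simpleSplit rest := by
        simp [simpleSplit, consHead]
      rw [hsplit]
      have hrest : consHead [] (simpleSplit rest) = simpleSplit rest := by
        cases hs : simpleSplit rest with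
        | nil => exact absurd hs (simpleSplit_ne_nil rest)
        | cons a b => simp [consHead]
      by_cases h2 : kept.length < 2
      · by_cases hw : pvWanted (PySem.Chars.strip buf)
        · rw [if_pos h2]
          simp only [hw, if_pos]
          rw [ih [] (kept ++ [PySem.Chars.strip buf]) (by simp; omega), hrest]
          simp [goodOf, hw]
          have : 2 - kept.length = (2 - (kept.length + 1)) + 1 := by omega
          rw [this]
          simp [List.take_succ_cons]
        · rw [if_pos h2]
          simp only [hw, Bool.false_eq_true, if_neg, not_false_iff]
          rw [ih [] kept hk, hrest]
          simp [goodOf, hw]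
      · have hlen : kept.length = 2 := by omega
        rw [if_neg h2]
        rw [ih [] kept hk, hrest]
        simp [goodOf, hlen]
    · simp only [altScan, hc, if_neg, not_false_iff]
      rw [ih (buf ++ [c]) kept hk]
      have : consHead buf (simpleSplit (c :: rest)) = consHead (buf ++ [c]) (simpleSplit rest) := by
        cases hs : simpleSplit rest with
        | nil => exact absurd hs (simpleSplit_ne_nil rest)
        | cons a b => simp [simpleSplit, hc, hs, consHead]
      rw [this]

-- ===== VERDICT (by name: the statement is the Claim_ definition above) =====
theorem main_desc_spec : Claim_equal_main_desc := by
  intro text _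
  show main_desc text = main_desc_alt text
  simp only [main_desc, main_desc_alt]
  rw [PySem.List.slice_to _ (by norm_num : (0:Int) ≤ 2)]
  rw [altScan_eq text.toList [] [] (by simp)]
  rw [splitOn_eq_simpleSplit]
  have hch : consHead [] (simpleSplit text.toList) = simpleSplit text.toList := by
    cases hs : simpleSplit text.toList with
    | nil => exact absurd hs (simpleSplit_ne_nil _)
    | cons a b => simp [consHead]
  rw [hch]
  have hfuse :
      List.filter (fun s => ! pvIsBad s)
        (List.filter (fun t => decide (15 < PySem.Chars.len t))
          ((simpleSplit text.toList).map PySem.Chars.strip))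
        = goodOf (simpleSplit text.toList) := by
    simp only [goodOf, List.filter_filter]
    apply List.filter_congr
    intro a _
    simp [pvWanted, Bool.and_comm]
  rw [hfuse]
  set K := goodOf (simpleSplit text.toList) with hK
  by_cases h : K = []
  · simp [h]
  · have h2 : K.take (2 : Int).toNat ≠ [] := by
      simp [List.take_eq_nil_iff, h]
    have h3 : K.take (2 - 0) ≠ [] := by
      simp [List.take_eq_nil_iff, h]
    have hT : ((2 : Int).toNat) = 2 - 0 := rfl
    simp [h, h3, hT]
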